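-- pv_equiv track=rewrite | github.com/Shinokama/Python-Algos | Lesson 7/Task 3.py | median_find
-- ===== SOURCE A (Python) =====
-- def median_find(list_):
--     i = 0
--     for n in list_:
--         less_points = 0
--         greater_points = 0
--         equal_points = 0
--         for m in range(len(list_)):
--             if m != i:
--                 if n > list_[m]:
--                     less_points += 1
--                 elif n < list_[m]:
--                     greater_points += 1
--                 else:
--                     equal_points += 1
--         i += 1
--         if abs(less_points - greater_points) == 0 or abs(less_points - greater_points) == equal_points:
--             return n
-- ===== SOURCE B (Python) =====
-- def median_find(list_):
--     cnt = {}
--     for x in list_: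
--         cnt[x] = cnt.get(x, 0) + 1
--     total = len(list_)
--     less = {}
--     acc = 0
--     for v in sorted(cnt):
--         less[v] = acc
--         acc += cnt[v]
--     for n in list_:
--         l = less[n]
--         c = cnt[n]
--         g = total - l - c
--         d = l - g
--         if d == 0 or abs(d) == c - 1:
--             return n
--     return None
-- ===== Notes on version B (the rewrite author's own statement) =====
-- stated objective: faster
-- what changed: Instead of rescanning the whole list for every element (nested loops), B builds a value->count dict in one pass, turns sorted distinct values into a prefix-sum dict of 'elements smaller than v', and then decides each element in O(1) during a single scan in original order.
import Mathlib
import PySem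

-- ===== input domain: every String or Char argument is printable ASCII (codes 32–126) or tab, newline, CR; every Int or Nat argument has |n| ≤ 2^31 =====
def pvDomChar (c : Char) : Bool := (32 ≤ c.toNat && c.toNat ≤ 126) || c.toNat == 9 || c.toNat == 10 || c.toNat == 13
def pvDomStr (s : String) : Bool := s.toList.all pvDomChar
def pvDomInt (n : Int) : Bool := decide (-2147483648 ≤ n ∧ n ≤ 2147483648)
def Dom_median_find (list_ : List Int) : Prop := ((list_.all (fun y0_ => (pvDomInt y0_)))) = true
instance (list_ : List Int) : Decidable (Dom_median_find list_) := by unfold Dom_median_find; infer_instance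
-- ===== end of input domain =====

-- B replaces A's per-element rescan of the whole list by one counting dict plus a prefix-sum
-- over the sorted distinct values, then a single scan in original order (objective: faster).

-- ===== PORT A =====
def pvMedianGo (list_ : List Int) (i : Int) : List Int → Option Int
  | [] => none
  | n :: rest =>
    let t := (PySem.List.pyRange 0 (list_.length : Int) 1).foldl
      (fun (t : Int × Int × Int) m =>
        if m ≠ i then
          if n > PySem.List.pyGetD list_ m 0 then (t.1 + 1, t.2.1, t.2.2)
          else if n < PySem.List.pyGetD list_ m 0 then (t.1, t.2.1 + 1, t.2.2)
          else (t.1, t.2.1, t.2.2 + 1)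
        else t) ((0 : Int), (0 : Int), (0 : Int))
    if |t.1 - t.2.1| = 0 ∨ |t.1 - t.2.1| = t.2.2 then some n
    else pvMedianGo list_ (i + 1) rest

def median_find (list_ : List Int) : Option Int := pvMedianGo list_ 0 list_

-- ===== PORT B =====
-- Source B's final scan; 'less[n]'/'cnt[n]' are ported as getD — n is always a key, so this is exact.
def pvScanB (cnt less : PySem.Dict Int Int) (total : Int) : List Int → Option Int
  | [] => none
  | n :: rest =>
    let l := less.getD n 0
    let c := cnt.getD n 0
    let g := total - l - c
    let d := l - g
    if d = 0 ∨ |d| = c - 1 then some n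
    else pvScanB cnt less total rest

def median_find_alt (list_ : List Int) : Option Int :=
  let cnt := list_.foldl (fun d x => d.insert x (d.getD x 0 + 1)) PySem.Dict.empty
  let total : Int := list_.length
  let p := (PySem.List.sorted cnt.keys (fun v => v) false).foldl
      (fun (p : PySem.Dict Int Int × Int) v => (p.1.insert v p.2, p.2 + cnt.getD v 0))
      (PySem.Dict.empty, 0)
  pvScanB cnt p.1 total list_

-- ===== PRECONDITION & SPEC =====
def Spec_median_find (list_ : List Int) (out : Option Int) : Prop := out = median_find_alt list_
instance (list_ : List Int) (out : Option Int) : Decidable (Spec_median_find list_ out) := by unfold Spec_median_find; infer_instance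

-- ===== CLAIM (what is proved, stated in full; the proofs are below) =====
def Claim_equal_median_find : Prop := ∀ (list_ : List Int), Dom_median_find list_ → Spec_median_find list_ (median_find list_)

-- ===== LEMMAS AND PROOFS =====

-- Reference condition: with l = #{x < n}, g = #{x > n} and e = count n - 1 over the whole list,
-- n is returned iff l - g = 0 or |l - g| = e; both ports return the first such element.
def pvCond (list_ : List Int) (n : Int) : Bool :=
  decide ((list_.countP (fun x => decide (x < n)) : Int) - (list_.countP (fun x => decide (n < x)) : Int) = 0
    ∨ |(list_.countP (fun x => decide (x < n)) : Int) - (list_.countP (fun x => decide (n < x)) : Int)|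
        = (list_.count n : Int) - 1)

def pvRef (list_ : List Int) : List Int → Option Int
  | [] => none
  | n :: rest => if pvCond list_ n then some n else pvRef list_ rest

def pvStep (n i : Int) (t : Int × Int × Int) (p : Int × Int) : Int × Int × Int :=
  if p.1 ≠ i then
    if n > p.2 then (t.1 + 1, t.2.1, t.2.2)
    else if n < p.2 then (t.1, t.2.1 + 1, t.2.2)
    else (t.1, t.2.1, t.2.2 + 1)
  else t

theorem pvFoldEnum (list_ : List Int) (n i : Int) (init : Int × Int × Int) :
    (PySem.List.pyRange 0 (list_.length : Int) 1).foldl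
      (fun (t : Int × Int × Int) m =>
        if m ≠ i then
          if n > PySem.List.pyGetD list_ m 0 then (t.1 + 1, t.2.1, t.2.2)
          else if n < PySem.List.pyGetD list_ m 0 then (t.1, t.2.1 + 1, t.2.2)
          else (t.1, t.2.1, t.2.2 + 1)
        else t) init
    = (PySem.List.enumerate list_ 0).foldl (pvStep n i) init := by
  have henum : PySem.List.enumerate list_ 0
      = (PySem.List.pyRange 0 (list_.length : Int) 1).map
          (fun j => (j, PySem.List.pyGetD list_ j 0)) := by
    simpa using PySem.List.enumerate_eq_map_pyRange list_ 0
  rw [henum, List.foldl_map]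
  rfl

theorem pvTrip (n i : Int) (l : List (Int × Int)) (a b c : Int) :
    l.foldl (pvStep n i) (a, b, c)
    = (a + (l.countP (fun p => decide (p.1 ≠ i) && decide (p.2 < n)) : Int),
       b + (l.countP (fun p => decide (p.1 ≠ i) && decide (n < p.2)) : Int),
       c + (l.countP (fun p => decide (p.1 ≠ i) && decide (p.2 = n)) : Int)) := by
  induction l generalizing a b c with
  | nil => simp
  | cons p t ih =>
    rw [List.foldl_cons]
    by_cases hp : p.1 = i
    · rw [show pvStep n i (a, b, c) p = (a, b, c) from by simp [pvStep, hp], ih]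
      simp [List.countP_cons, hp]
    · rcases lt_trichotomy p.2 n with h | h | h
      · rw [show pvStep n i (a, b, c) p = (a + 1, b, c) from by simp [pvStep, hp, h], ih]
        simp only [List.countP_cons, Prod.mk.injEq]
        refine ⟨?_, ?_, ?_⟩ <;>
          simp [hp, h, (show ¬ n < p.2 by omega), (show ¬ p.2 = n by omega)] <;> push_cast <;> ring
      · rw [show pvStep n i (a, b, c) p = (a, b, c + 1) from by
          simp [pvStep, hp, h], ih]
        simp only [List.countP_cons, Prod.mk.injEq]
        refine ⟨?_, ?_, ?_⟩ <;>
          simp [hp, h, (show ¬ n < p.2 by omega), (show ¬ p.2 < n by omega)] <;> push_cast <;> ring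
      · rw [show pvStep n i (a, b, c) p = (a, b + 1, c) from by
          simp [pvStep, hp, h, show ¬ n > p.2 by omega], ih]
        simp only [List.countP_cons, Prod.mk.injEq]
        refine ⟨?_, ?_, ?_⟩ <;>
          simp [hp, h, (show ¬ p.2 < n by omega), (show ¬ p.2 = n by omega)] <;> push_cast <;> ring

theorem pvCountEnum (q : Int → Bool) (i : Int) (xs : List Int) (s : Int)
    (h : i < s ∨ s + (xs.length : Int) ≤ i) :
    (PySem.List.enumerate xs s).countP (fun p => decide (p.1 ≠ i) && q p.2) = xs.countP q := by
  induction xs generalizing s with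
  | nil => simp [PySem.List.enumerate]
  | cons x t ih =>
    have hlen : ((x :: t).length : Int) = (t.length : Int) + 1 := by simp
    have hsne : s ≠ i := by rcases h with h | h; · omega
                            · rw [hlen] at h; omega
    have hrec := ih (s + 1) (by rcases h with h | h; · left; omega
                                · right; rw [hlen] at h; omega)
    rw [show PySem.List.enumerate (x :: t) s = (s, x) :: PySem.List.enumerate t (s + 1) from by
      simp [PySem.List.enumerate]]
    rw [List.countP_cons, List.countP_cons, hrec]
    simp [hsne]

theorem pvCountEq (l : List Int) (n : Int) : l.countP (fun x => decide (x = n)) = l.count n := by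
  induction l with
  | nil => simp
  | cons x t ih => by_cases hx : x = n <;> simp [List.countP_cons, List.count_cons, hx, ih]

theorem pvTotal (list_ : List Int) (n : Int) :
    list_.length = list_.countP (fun x => decide (x < n)) + list_.countP (fun x => decide (n < x))
      + list_.count n := by
  induction list_ with
  | nil => simp
  | cons x t ih =>
    rcases lt_trichotomy x n with h | h | h
    · simp [List.countP_cons, List.count_cons, h, (show ¬ n < x by omega),
        (show ¬ x = n by omega), ih]; omega
    · simp [List.countP_cons, List.count_cons, h, ih]; omega
    · simp [List.countP_cons, List.count_cons, h, (show ¬ x < n by omega),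
        (show ¬ x = n by omega), ih]; omega

theorem pvAGo_eq (pre suf : List Int) :
    pvMedianGo (pre ++ suf) (pre.length : Int) suf = pvRef (pre ++ suf) suf := by
  induction suf generalizing pre with
  | nil => simp [pvMedianGo, pvRef]
  | cons n rest ih =>
    simp only [pvMedianGo, pvRef]
    rw [pvFoldEnum]
    have hdec : PySem.List.enumerate (pre ++ n :: rest) 0
        = PySem.List.enumerate pre 0 ++ ((pre.length : Int), n)
            :: PySem.List.enumerate rest ((pre.length : Int) + 1) := by
      rw [PySem.List.enumerate_append]
      rw [show PySem.List.enumerate (n :: rest) (0 + (pre.length : Int))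
          = ((pre.length : Int), n) :: PySem.List.enumerate rest ((pre.length : Int) + 1) from by
        simp [PySem.List.enumerate]]
    rw [hdec, pvTrip]
    have c1 := pvCountEnum (fun x => decide (x < n)) (pre.length : Int) pre 0 (Or.inr (by simp))
    have c2 := pvCountEnum (fun x => decide (n < x)) (pre.length : Int) pre 0 (Or.inr (by simp))
    have c3 := pvCountEnum (fun x => decide (x = n)) (pre.length : Int) pre 0 (Or.inr (by simp))
    have d1 := pvCountEnum (fun x => decide (x < n)) (pre.length : Int) rest
      ((pre.length : Int) + 1) (Or.inl (by omega))
    have d2 := pvCountEnum (fun x => decide (n < x)) (pre.length : Int) rest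
      ((pre.length : Int) + 1) (Or.inl (by omega))
    have d3 := pvCountEnum (fun x => decide (x = n)) (pre.length : Int) rest
      ((pre.length : Int) + 1) (Or.inl (by omega))
    rw [List.countP_append, List.countP_append, List.countP_append,
        List.countP_cons, List.countP_cons, List.countP_cons, c1, c2, c3, d1, d2, d3]
    -- middle pair contributes nowhere
    simp only [ne_eq, not_true_eq_false, decide_false, Bool.false_and, Bool.and_self,
      decide_not, Bool.not_true]
    have hA : (pre ++ n :: rest).countP (fun x => decide (x < n))
        = pre.countP (fun x => decide (x < n)) + rest.countP (fun x => decide (x < n)) := by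
      rw [List.countP_append, List.countP_cons]; simp
    have hB : (pre ++ n :: rest).countP (fun x => decide (n < x))
        = pre.countP (fun x => decide (n < x)) + rest.countP (fun x => decide (n < x)) := by
      rw [List.countP_append, List.countP_cons]; simp
    have hK : ((pre ++ n :: rest).count n : Int)
        = (pre.countP (fun x => decide (x = n)) : Int)
          + (rest.countP (fun x => decide (x = n)) : Int) + 1 := by
      rw [← pvCountEq (pre ++ n :: rest) n, List.countP_append, List.countP_cons]
      simp; push_cast; ring
    have hrecur : pvMedianGo (pre ++ n :: rest) ((pre.length : Int) + 1) rest
        = pvRef (pre ++ n :: rest) rest := by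
      have h := ih (pre ++ [n])
      rw [List.append_assoc] at h
      simpa using h
    rw [hrecur]
    apply if_congr _ rfl rfl
    simp only [pvCond, hA, hB, hK, decide_eq_true_eq]
    push_cast
    rw [abs_eq_zero]
    simp only [zero_add, add_zero]
    constructor <;> intro h <;> rcases h with h | h
    · left; omega
    · right; omega
    · left; omega
    · right; omega

theorem pvCountSplit (v : Int) (u : List Int) (hv : v ∉ u) (l : List Int) :
    l.countP (fun x => decide (x = v) || decide (x ∈ u))
      = l.count v + l.countP (fun x => decide (x ∈ u)) := by
  induction l with
  | nil => simp
  | cons x t ih =>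
    by_cases hx : x = v
    · subst hx
      simp [List.countP_cons, List.count_cons, ih, hv]
      omega
    · by_cases hxu : x ∈ u <;>
        simp [List.countP_cons, List.count_cons, ih, hx, hxu] <;> omega

theorem pvSumCounts (u : List Int) (hu : u.Nodup) (l : List Int) :
    (u.map (fun v => (l.count v : Int))).sum = (l.countP (fun x => decide (x ∈ u)) : Int) := by
  induction u with
  | nil => simp
  | cons v t ih =>
    have hnd := List.nodup_cons.mp hu
    have h := pvCountSplit v t hnd.1 l
    have hcongr : l.countP (fun x => decide (x ∈ v :: t))
        = l.countP (fun x => decide (x = v) || decide (x ∈ t)) := by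
      apply List.countP_congr; intro x _; simp [List.mem_cons]
    rw [List.map_cons, List.sum_cons, ih hnd.2, hcongr, h]
    push_cast; ring

theorem pvLessUntouched (cnt : PySem.Dict Int Int) (s : List Int) (d : PySem.Dict Int Int)
    (acc : Int) (n : Int) (hn : n ∉ s) :
    ((s.foldl (fun p v => (p.1.insert v p.2, p.2 + cnt.getD v 0)) (d, acc)).1).getD n 0
      = d.getD n 0 := by
  induction s generalizing d acc with
  | nil => simp
  | cons v t ih =>
    have hnv : n ≠ v := by intro h; exact hn (h ▸ List.mem_cons_self)
    have hnt : n ∉ t := fun h => hn (List.mem_cons_of_mem _ h)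
    rw [List.foldl_cons, ih _ _ hnt, PySem.Dict.getD_insert_of_ne _ _ _ hnv]

theorem pvLessFold (cnt : PySem.Dict Int Int) (s : List Int) (hs : s.Pairwise (· < ·))
    (d : PySem.Dict Int Int) (acc : Int) (n : Int) (hn : n ∈ s) :
    ((s.foldl (fun p v => (p.1.insert v p.2, p.2 + cnt.getD v 0)) (d, acc)).1).getD n 0
      = acc + ((s.filter (fun v => decide (v < n))).map (fun v => cnt.getD v 0)).sum := by
  induction s generalizing d acc with
  | nil => simp at hn
  | cons v t ih =>
    have hvt : ∀ y ∈ t, v < y := fun y hy => List.rel_of_pairwise_cons hs hy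
    rw [List.foldl_cons]
    rcases List.mem_cons.mp hn with hnv | hnt
    · subst hnv
      have hnt : n ∉ t := fun h => absurd (hvt n h) (lt_irrefl n)
      rw [pvLessUntouched cnt t _ _ n hnt, PySem.Dict.getD_insert_self]
      have hfilt : (n :: t).filter (fun v => decide (v < n)) = [] := by
        rw [List.filter_cons]
        simp only [decide_eq_true_eq, lt_irrefl, if_false]
        · rw [List.filter_eq_nil_iff.mpr]
          intro y hy
          simp only [decide_eq_true_eq, not_lt]
          exact le_of_lt (hvt y hy)
      rw [hfilt]; simp
    · have hvn : v < n := hvt n hnt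
      rw [ih hs.of_cons _ _ hnt]
      rw [List.filter_cons]
      simp only [hvn, decide_true, if_true, List.map_cons, List.sum_cons]
      show acc + cnt.getD v 0 + _ = _
      ring

theorem pvScan (list_ : List Int) (cnt less : PySem.Dict Int Int)
    (hc : ∀ nn, cnt.getD nn 0 = ((list_.count nn : Int)))
    (hl : ∀ nn ∈ list_, less.getD nn 0 = ((list_.countP (fun x => decide (x < nn)) : Int))) :
    ∀ suf, (∀ x ∈ suf, x ∈ list_) →
      pvScanB cnt less (list_.length : Int) suf = pvRef list_ suf := by
  intro suf
  induction suf with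
  | nil => intro _; simp [pvScanB, pvRef]
  | cons nn rest ih =>
    intro hsub
    have hmem : nn ∈ list_ := hsub nn List.mem_cons_self
    have hrec := ih (fun x hx => hsub x (List.mem_cons_of_mem _ hx))
    simp only [pvScanB, pvRef, hc nn, hl nn hmem]
    have htot : ((list_.length : Int))
        = (list_.countP (fun x => decide (x < nn)) : Int)
          + (list_.countP (fun x => decide (nn < x)) : Int) + (list_.count nn : Int) := by
      exact_mod_cast congrArg (Nat.cast : Nat → Int) (pvTotal list_ nn)
    have hsub2 : (list_.length : Int) - (list_.countP (fun x => decide (x < nn)) : Int)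
        - (list_.count nn : Int) = (list_.countP (fun x => decide (nn < x)) : Int) := by omega
    rw [hsub2, hrec]
    have hcond : (pvCond list_ nn = true)
        ↔ ((list_.countP (fun x => decide (x < nn)) : Int)
            - (list_.countP (fun x => decide (nn < x)) : Int) = 0
          ∨ |(list_.countP (fun x => decide (x < nn)) : Int)
            - (list_.countP (fun x => decide (nn < x)) : Int)| = (list_.count nn : Int) - 1) := by
      simp [pvCond]
    rw [if_congr hcond.symm rfl rfl]

theorem pvAlt_eq (list_ : List Int) : median_find_alt list_ = pvRef list_ list_ := by
  rw [median_find_alt]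
  simp only [PySem.Dict.foldl_insert_getD_add_one_eq_counter, PySem.Dict.keys_counter]
  have hpair : (PySem.List.sorted (PySem.Set.ofList list_) (fun v => v) false).Pairwise (· < ·) :=
    PySem.List.sorted_ofList_pairwise_lt list_
  have hnd : (PySem.List.sorted (PySem.Set.ofList list_) (fun v => v) false).Nodup :=
    (hpair.imp fun h => ne_of_lt h)
  apply pvScan
  · intro nn; exact PySem.Dict.getD_counter list_ nn
  · intro nn hnn
    rw [pvLessFold (PySem.Dict.counter list_) _ hpair _ _ _
        ((PySem.List.mem_sorted _ _ _ _).mpr ((PySem.Set.mem_ofList _ _).mpr hnn))]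
    rw [zero_add]
    have hm : ((PySem.List.sorted (PySem.Set.ofList list_) (fun v => v) false).filter
          (fun v => decide (v < nn))).map (fun v => (PySem.Dict.counter list_).getD v 0)
        = ((PySem.List.sorted (PySem.Set.ofList list_) (fun v => v) false).filter
          (fun v => decide (v < nn))).map (fun v => (list_.count v : Int)) := by
      apply List.map_congr_left
      intro v _
      exact PySem.Dict.getD_counter list_ v
    rw [hm, pvSumCounts _ (hnd.filter _) list_]
    congr 1
    apply List.countP_congr
    intro x hx
    simp only [List.mem_filter, PySem.List.mem_sorted, PySem.Set.mem_ofList]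
    simp [hx]
  · intro x hx; exact hx

-- ===== VERDICT (by name: the statement is the Claim_ definition above) =====
theorem median_find_spec : Claim_equal_median_find := by
  intro list_ _
  unfold Spec_median_find
  have hA : median_find list_ = pvRef list_ list_ := by
    have := pvAGo_eq [] list_
    simpa [median_find] using this
  rw [hA, ← pvAlt_eq]
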